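-- pv_equiv track=rewrite | github.com/dcermak/rpm-spec-language-server | utils/extract_docs.py | get_preamble_or_dependencies_doc
-- ===== SOURCE A (Python) =====
-- def get_preamble_or_dependencies_doc(keyword, chunk):
--     entered_doc = False
--     doc = ''
--     for line in chunk:
--         if ((not entered_doc) and line.startswith('#### ') and (keyword in line)):
--             entered_doc = True
--             continue
--         if ((entered_doc) and line.startswith('#### ')):
--             entered_doc = False
--             break
--
--         if entered_doc:
--             doc += line
--
--     return(doc.strip())
-- ===== SOURCE B (Python) =====
-- def get_preamble_or_dependencies_doc(keyword, chunk):
--     headers = [(i, line) for i, line in enumerate(chunk) if line.startswith('#### ')]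
--     for k, (i, line) in enumerate(headers):
--         if keyword in line:
--             end = headers[k + 1][0] if k + 1 < len(headers) else len(chunk)
--             return ''.join(chunk[i + 1:end]).strip()
--     return ''
-- ===== Notes on version B (the rewrite author's own statement) =====
-- stated objective: alternative
-- what changed: Instead of a single streaming pass with a toggling boolean flag and string +=, B first builds an index of all '#### ' header positions via enumerate+filter, looks up the first header containing the keyword, and returns the slice of chunk between that header and the next header (or the end), joined and stripped.
import Mathlib
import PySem

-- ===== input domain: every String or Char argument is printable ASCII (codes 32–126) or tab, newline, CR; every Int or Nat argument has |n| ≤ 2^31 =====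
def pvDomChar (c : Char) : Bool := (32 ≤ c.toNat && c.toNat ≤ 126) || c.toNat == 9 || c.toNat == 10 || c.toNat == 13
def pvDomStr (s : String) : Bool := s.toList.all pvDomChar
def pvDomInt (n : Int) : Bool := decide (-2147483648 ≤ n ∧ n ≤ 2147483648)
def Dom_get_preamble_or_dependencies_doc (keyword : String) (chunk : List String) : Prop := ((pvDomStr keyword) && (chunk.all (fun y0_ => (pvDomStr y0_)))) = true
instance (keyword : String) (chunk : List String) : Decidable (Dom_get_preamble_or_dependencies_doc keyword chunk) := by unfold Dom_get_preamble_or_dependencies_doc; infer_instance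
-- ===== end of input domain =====

-- B replaces A's single streaming pass with a toggling boolean flag by a precomputed
-- index of '#### ' header positions, a lookup of the keyword's header, and a slice of
-- chunk between that header and the next one (objective: alternative; same cost).

-- ===== PORT A =====
-- A: single pass with a toggling entered_doc flag, accumulating doc by string concatenation.
def goA_get_preamble (keyword : String) (entered : Bool) (doc : String) : List String → String
  | [] => PySem.Str.strip doc
  | line :: rest =>
    if !entered && PySem.Str.startswith line "#### " && PySem.Str.isIn keyword line then
      goA_get_preamble keyword true doc rest
    else if entered && PySem.Str.startswith line "#### " then
      PySem.Str.strip doc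
    else if entered then
      goA_get_preamble keyword entered (doc ++ line) rest
    else
      goA_get_preamble keyword entered doc rest

def get_preamble_or_dependencies_doc (keyword : String) (chunk : List String) : String :=
  goA_get_preamble keyword false "" chunk

-- ===== PORT B =====
-- B: headers = [(i, line) for i, line in enumerate(chunk) if line.startswith('#### ')];
-- find the first header containing keyword; slice chunk from after it up to the next
-- header's index (lookahead = head of the remaining headers list) or len(chunk).
def findDocB (keyword : String) (chunk : List String) : List (Int × String) → String
  | [] => ""
  | (i, line) :: rest =>
    if PySem.Str.isIn keyword line then
      let endIdx : Int := match rest with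
        | (j, _) :: _ => j
        | [] => (chunk.length : Int)
      PySem.Str.strip (PySem.Str.join "" (PySem.List.slice chunk (some (i + 1)) (some endIdx)))
    else findDocB keyword chunk rest

def get_preamble_or_dependencies_doc_alt (keyword : String) (chunk : List String) : String :=
  findDocB keyword chunk
    ((PySem.List.enumerate chunk 0).filter (fun p => PySem.Str.startswith p.2 "#### "))

-- ===== PRECONDITION & SPEC =====
def Spec_get_preamble_or_dependencies_doc (keyword : String) (chunk : List String) (out : String) : Prop := out = get_preamble_or_dependencies_doc_alt keyword chunk
instance (keyword : String) (chunk : List String) (out : String) : Decidable (Spec_get_preamble_or_dependencies_doc keyword chunk out) := by unfold Spec_get_preamble_or_dependencies_doc; infer_instance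

-- ===== CLAIM (what is proved, stated in full; the proofs are below) =====
def Claim_equal_get_preamble_or_dependencies_doc : Prop := ∀ (keyword : String) (chunk : List String), Dom_get_preamble_or_dependencies_doc keyword chunk → Spec_get_preamble_or_dependencies_doc keyword chunk (get_preamble_or_dependencies_doc keyword chunk)

-- ===== LEMMAS AND PROOFS =====

-- Proof-side normal form: drop to the matching header, take to the next header.
def dropToMarker (keyword : String) : List String → List String
  | [] => []
  | line :: rest =>
    if PySem.Str.startswith line "#### " && PySem.Str.isIn keyword line then rest
    else dropToMarker keyword rest

def takeToMarker : List String → List String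
  | [] => []
  | line :: rest =>
    if PySem.Str.startswith line "#### " then []
    else line :: takeToMarker rest

def hdrsOf (s : List String) (j : Int) : List (Int × String) :=
  (PySem.List.enumerate s j).filter (fun p => PySem.Str.startswith p.2 "#### ")

theorem join_empty_cons (a : String) (l : List String) :
    PySem.Str.join "" (a :: l) = a ++ PySem.Str.join "" l := by
  cases l with
  | nil => simp [PySem.Str.join, PySem.Chars.join, List.intercalate]
  | cons b t => simp [PySem.Str.join, PySem.Chars.join, List.intercalate]

theorem phase2 (keyword doc : String) (rest : List String) :
    goA_get_preamble keyword true doc rest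
      = PySem.Str.strip (doc ++ PySem.Str.join "" (takeToMarker rest)) := by
  induction rest generalizing doc with
  | nil => simp [goA_get_preamble, takeToMarker, PySem.Str.join]
  | cons line rest ih =>
    by_cases h : PySem.Chars.startswith line.toList ['#', '#', '#', '#', ' '] = true
    · simp [goA_get_preamble, takeToMarker, h, PySem.Str.join, PySem.Chars.join, List.intercalate]
    · simp [goA_get_preamble, takeToMarker, h, ih, join_empty_cons, String.append_assoc]

theorem phase1 (keyword doc : String) (chunk : List String) :
    goA_get_preamble keyword false doc chunk
      = PySem.Str.strip (doc ++ PySem.Str.join "" (takeToMarker (dropToMarker keyword chunk))) := by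
  induction chunk with
  | nil => simp [goA_get_preamble, dropToMarker, takeToMarker, PySem.Str.join]
  | cons line rest ih =>
    by_cases hs : PySem.Chars.startswith line.toList ['#', '#', '#', '#', ' '] = true
    · by_cases hk : PySem.Chars.isIn keyword.toList line.toList = true
      · simp [goA_get_preamble, dropToMarker, hs, hk, phase2]
      · simp [goA_get_preamble, dropToMarker, hs, hk, ih]
    · simp [goA_get_preamble, dropToMarker, hs, ih]

-- Shape of the header index of a suffix s starting at offset j: either s has no header
-- (and takeToMarker keeps all of s), or its first header is at offset j + t where
-- takeToMarker keeps exactly the first t lines.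
theorem hdrs_shape (s : List String) (j : Int) :
    (hdrsOf s j = [] ∧ takeToMarker s = s)
    ∨ ∃ (t : Nat) (h : String) (rest : List (Int × String)),
        hdrsOf s j = (j + t, h) :: rest ∧ takeToMarker s = s.take t ∧ t ≤ s.length := by
  induction s generalizing j with
  | nil => exact Or.inl ⟨rfl, rfl⟩
  | cons line s ih =>
    by_cases hs : PySem.Chars.startswith line.toList ['#', '#', '#', '#', ' '] = true
    · refine Or.inr ⟨0, line, (hdrsOf s (j + 1)), ?_, ?_, by simp⟩
      · simp [hdrsOf, PySem.List.enumerate_cons, hs]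
      · simp [takeToMarker, hs]
    · rcases ih (j + 1) with ⟨he, ht⟩ | ⟨t, h, rest, he, ht, hle⟩
      · refine Or.inl ⟨?_, ?_⟩
        · simpa [hdrsOf, PySem.List.enumerate_cons, hs] using he
        · simp [takeToMarker, hs, ht]
      · refine Or.inr ⟨t + 1, h, rest, ?_, ?_, by simpa using Nat.succ_le_succ hle⟩
        · have hg : hdrsOf (line :: s) j = hdrsOf s (j + 1) := by
            simp [hdrsOf, PySem.List.enumerate_cons, hs]
          rw [hg, he]
          simp only [List.cons.injEq, Prod.mk.injEq, and_true, and_self_iff]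
          push_cast; ring
        · simp [takeToMarker, hs, ht]

-- The slice between a matched header (at index pre'.length - 1, so slice starts at
-- pre'.length) and the next header equals takeToMarker of the suffix.
theorem slice_eq_takeToMarker (pre' s : List String) :
    PySem.List.slice (pre' ++ s) (some (pre'.length : Int))
      (some (match hdrsOf s (pre'.length : Int) with
             | (j, _) :: _ => j
             | [] => (((pre' ++ s).length : Nat) : Int)))
      = takeToMarker s := by
  rcases hdrs_shape s (pre'.length : Int) with ⟨he, ht⟩ | ⟨t, h, rest, he, ht, hle⟩
  · rw [he]
    have : (((pre' ++ s).length : Nat) : Int) = (pre'.length : Int) + (s.length : Nat) := by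
      simp [List.length_append]
    rw [this, PySem.List.slice_natCast_add]
    simp [ht]
  · rw [he, ht]
    have : (pre'.length : Int) + (t : Nat) = (pre'.length : Int) + (t : Int) := by push_cast; ring
    rw [PySem.List.slice_natCast_add]
    simp

-- Main invariant: running B's search on the header index of the suffix s (chunk =
-- pre ++ s) computes the drop/take normal form of s.
theorem mainG (keyword : String) (s : List String) : ∀ (pre : List String),
    findDocB keyword (pre ++ s) (hdrsOf s (pre.length : Int))
      = PySem.Str.strip (PySem.Str.join "" (takeToMarker (dropToMarker keyword s))) := by
  induction s with
  | nil =>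
    intro pre
    simp [hdrsOf, findDocB, dropToMarker, takeToMarker, PySem.Str.join,
      PySem.Chars.join, List.intercalate, PySem.Str.strip, PySem.Chars.strip,
      PySem.Chars.lstrip, PySem.Chars.rstrip]
  | cons line s ih =>
    intro pre
    have hlen : ((pre ++ [line]).length : Int) = (pre.length : Int) + 1 := by
      simp [List.length_append]
    by_cases hs : PySem.Chars.startswith line.toList ['#', '#', '#', '#', ' '] = true
    · by_cases hk : PySem.Chars.isIn keyword.toList line.toList = true
      · -- matched header at index pre.length; slice starts at pre.length + 1
        have hsl := slice_eq_takeToMarker (pre ++ [line]) s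
        rw [hlen] at hsl
        simp only [List.append_assoc, List.singleton_append] at hsl
        have hgoal : hdrsOf (line :: s) (pre.length : Int)
            = ((pre.length : Int), line) :: hdrsOf s ((pre.length : Int) + 1) := by
          simp [hdrsOf, PySem.List.enumerate_cons, hs]
        have hd : dropToMarker keyword (line :: s) = s := by
          simp [dropToMarker, hs, hk]
        rw [hgoal, hd]
        simp only [findDocB, PySem.Str.isIn, hk, if_true]
        rw [hsl]
      · -- header without keyword: A skips it, B's index skips it too
        have := ih (pre ++ [line])
        rw [hlen] at this
        simp only [List.append_assoc, List.singleton_append] at this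
        simpa [hdrsOf, PySem.List.enumerate_cons, hs, hk, findDocB, dropToMarker] using this
    · have := ih (pre ++ [line])
      rw [hlen] at this
      simp only [List.append_assoc, List.singleton_append] at this
      simpa [hdrsOf, PySem.List.enumerate_cons, hs, dropToMarker] using this

-- ===== VERDICT (by name: the statement is the Claim_ definition above) =====
theorem get_preamble_or_dependencies_doc_spec : Claim_equal_get_preamble_or_dependencies_doc := by
  intro keyword chunk _
  unfold Spec_get_preamble_or_dependencies_doc get_preamble_or_dependencies_doc get_preamble_or_dependencies_doc_alt
  rw [phase1]
  have h := mainG keyword chunk []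
  simp only [List.nil_append, List.length_nil, Nat.cast_zero, hdrsOf] at h
  have he : ∀ s : String, "" ++ s = s := fun s => by simp
  rw [he, ← h]
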